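-- pv_equiv track=rewrite | github.com/MouinulIslamNJIT/BallotChange | calculateMargin.py | calculateIandQ
-- ===== SOURCE A (Python) =====
-- def calculateIandQ(Lv,Lc,a,b):
--     counta = 0
--     countb = 0
--     ia = -1
--     ib = -1
--     aq = -1
--     bq = -1
--     for (i,j) in zip(enumerate(Lv),Lc):
--         if j == "A":
--             counta += 1
--         if j == "B":
--             countb += 1
--         if counta == a:
--             ia = i[0]
--             aq = i[1]
--         if countb == b:
--             ib = i[0]
--             bq = i[1]
--     return ia,aq,ib,bq
-- ===== SOURCE B (Python) =====
-- def _last_at(table, t):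
--     # table rows are (index, vote-value, cumulative count); scan from the end,
--     # return the last row whose cumulative count equals t.
--     for i, v, cnt in reversed(table):
--         if cnt == t:
--             return i, v
--     return -1, -1
--
--
-- def calculateIandQ(Lv, Lc, a, b):
--     ca = cb = 0
--     tA = []
--     tB = []
--     for i, (v, c) in enumerate(zip(Lv, Lc)):
--         if c == "A":
--             ca += 1
--         if c == "B":
--             cb += 1
--         tA.append((i, v, ca))
--         tB.append((i, v, cb))
--     ia, aq = _last_at(tA, a)
--     ib, bq = _last_at(tB, b)
--     return ia, aq, ib, bq
-- ===== Notes on version B (the rewrite author's own statement) =====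
-- stated objective: alternative
-- what changed: Replaces the single fused stateful pass (six mutable variables, last-write-wins) by a two-phase decomposition: one pass builds per-index cumulative-count tables for 'A' and 'B', then each table is searched backwards for the last index whose cumulative count equals the threshold (early exit on first hit from the end).
import Mathlib
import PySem

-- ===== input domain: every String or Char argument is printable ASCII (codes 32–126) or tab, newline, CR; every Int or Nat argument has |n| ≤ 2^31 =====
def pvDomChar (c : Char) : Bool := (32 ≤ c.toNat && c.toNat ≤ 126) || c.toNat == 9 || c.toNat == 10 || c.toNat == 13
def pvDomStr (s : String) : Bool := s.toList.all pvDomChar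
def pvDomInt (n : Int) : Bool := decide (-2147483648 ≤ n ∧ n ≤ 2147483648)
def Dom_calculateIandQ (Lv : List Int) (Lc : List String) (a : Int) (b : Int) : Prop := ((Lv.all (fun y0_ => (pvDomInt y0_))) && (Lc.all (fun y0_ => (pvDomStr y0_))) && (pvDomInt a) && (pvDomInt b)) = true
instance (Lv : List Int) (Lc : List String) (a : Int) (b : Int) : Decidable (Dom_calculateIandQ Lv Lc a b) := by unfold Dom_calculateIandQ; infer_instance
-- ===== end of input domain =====

-- B replaces A's fused six-variable pass by a prefix-count-table build plus a
-- backward search for the last index whose cumulative count equals the threshold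
-- (objective: alternative decomposition; same O(n) cost).

-- ===== PORT A =====
-- state: ((counta, ia, aq), (countb, ib, bq)); one step of A's loop body
def pvStepA (a b : Int) (s : (Int × Int × Int) × (Int × Int × Int))
    (p : (Int × Int) × String) : (Int × Int × Int) × (Int × Int × Int) :=
  let ca := if p.2 == "A" then s.1.1 + 1 else s.1.1
  let cb := if p.2 == "B" then s.2.1 + 1 else s.2.1
  let iaaq := if ca == a then (p.1.1, p.1.2) else (s.1.2.1, s.1.2.2)
  let ibbq := if cb == b then (p.1.1, p.1.2) else (s.2.2.1, s.2.2.2)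
  ((ca, iaaq.1, iaaq.2), (cb, ibbq.1, ibbq.2))

def calculateIandQ (Lv : List Int) (Lc : List String) (a : Int) (b : Int) : Int × Int × Int × Int :=
  let s := ((PySem.List.enumerate Lv).zip Lc).foldl (pvStepA a b) ((0, -1, -1), (0, -1, -1))
  (s.1.2.1, s.1.2.2, s.2.2.1, s.2.2.2)

-- ===== PORT B =====
-- backward search (Python's `for … in reversed(table)`): scan the reversed table,
-- return first row whose count equals t
def pvLastAt : List (Int × Int × Int) → Int → Int × Int
  | [], _ => (-1, -1)
  | (i, v, cnt) :: rest, t => if cnt == t then (i, v) else pvLastAt rest t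

-- table-building loop of B: state (ca, cb, tA, tB)
def pvBuild (s : Int × Int × List (Int × Int × Int) × List (Int × Int × Int))
    (p : Int × Int × String) : Int × Int × List (Int × Int × Int) × List (Int × Int × Int) :=
  let ca := if p.2.2 == "A" then s.1 + 1 else s.1
  let cb := if p.2.2 == "B" then s.2.1 + 1 else s.2.1
  (ca, cb, s.2.2.1 ++ [(p.1, p.2.1, ca)], s.2.2.2 ++ [(p.1, p.2.1, cb)])

def calculateIandQ_alt (Lv : List Int) (Lc : List String) (a : Int) (b : Int) : Int × Int × Int × Int :=
  let s := (PySem.List.enumerate (Lv.zip Lc)).foldl pvBuild (0, 0, [], [])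
  let iaaq := pvLastAt s.2.2.1.reverse a
  let ibbq := pvLastAt s.2.2.2.reverse b
  (iaaq.1, iaaq.2, ibbq.1, ibbq.2)

-- ===== PRECONDITION & SPEC =====
def Spec_calculateIandQ (Lv : List Int) (Lc : List String) (a : Int) (b : Int) (out : Int × Int × Int × Int) : Prop := out = calculateIandQ_alt Lv Lc a b
instance (Lv : List Int) (Lc : List String) (a : Int) (b : Int) (out : Int × Int × Int × Int) : Decidable (Spec_calculateIandQ Lv Lc a b out) := by unfold Spec_calculateIandQ; infer_instance

-- ===== CLAIM (what is proved, stated in full; the proofs are below) =====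
def Claim_equal_calculateIandQ : Prop := ∀ (Lv : List Int) (Lc : List String) (a : Int) (b : Int), Dom_calculateIandQ Lv Lc a b → Spec_calculateIandQ Lv Lc a b (calculateIandQ Lv Lc a b)

-- ===== LEMMAS AND PROOFS =====

-- option-valued backward search, for stating the invariant with a default
def pvLastAt? : List (Int × Int × Int) → Int → Option (Int × Int)
  | [], _ => none
  | (i, v, cnt) :: rest, t => if cnt == t then some (i, v) else pvLastAt? rest t

theorem pvLastAt_eq (xs : List (Int × Int × Int)) (t : Int) :
    pvLastAt xs t = (pvLastAt? xs t).getD (-1, -1) := by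
  induction xs with
  | nil => rfl
  | cons x rest ih =>
    obtain ⟨i, v, cnt⟩ := x
    simp only [pvLastAt, pvLastAt?]
    split <;> simp [ih]

theorem pvLastAt?_append (xs ys : List (Int × Int × Int)) (t : Int) :
    pvLastAt? (xs ++ ys) t = (pvLastAt? xs t).or (pvLastAt? ys t) := by
  induction xs with
  | nil => rfl
  | cons x rest ih =>
    obtain ⟨i, v, cnt⟩ := x
    simp only [List.cons_append, pvLastAt?]
    split <;> simp [ih]

-- single-channel step of A's loop, and the per-channel table (built front-first)
def pvChanStep (lbl : String) (t : Int) (s : Int × Int × Int)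
    (p : (Int × Int) × String) : Int × Int × Int :=
  let c := if p.2 == lbl then s.1 + 1 else s.1
  if c == t then (c, p.1.1, p.1.2) else (c, s.2.1, s.2.2)

def pvTable (lbl : String) (c0 : Int) : List ((Int × Int) × String) → List (Int × Int × Int)
  | [] => []
  | p :: rest =>
    let c := if p.2 == lbl then c0 + 1 else c0
    (p.1.1, p.1.2, c) :: pvTable lbl c rest

-- the fused fold is the product of the two channel folds
theorem pvStepA_split (a b : Int) (L : List ((Int × Int) × String))
    (sA sB : Int × Int × Int) :
    L.foldl (pvStepA a b) (sA, sB) =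
      (L.foldl (pvChanStep "A" a) sA, L.foldl (pvChanStep "B" b) sB) := by
  induction L generalizing sA sB with
  | nil => rfl
  | cons p rest ih =>
    obtain ⟨⟨i, v⟩, c⟩ := p
    simp only [List.foldl_cons, ih]
    congr 1 <;>
    · simp only [pvStepA, pvChanStep]
      split <;> split <;> rfl

-- channel-fold invariant: final (ia, aq) = backward search of the table, default = incoming (ia, aq)
theorem pvChan_eq_table (lbl : String) (t : Int) (L : List ((Int × Int) × String))
    (c0 : Int) (d : Int × Int) :
    (L.foldl (pvChanStep lbl t) (c0, d.1, d.2)).2 =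
      ((pvLastAt? (pvTable lbl c0 L).reverse t).getD d : Int × Int) := by
  induction L generalizing c0 d with
  | nil => rfl
  | cons p rest ih =>
    obtain ⟨⟨i, v⟩, c⟩ := p
    simp only [List.foldl_cons, pvTable, List.reverse_cons, pvLastAt?_append]
    have hone : pvLastAt? [(i, v, if c == lbl then c0 + 1 else c0)] t =
        if (if c == lbl then c0 + 1 else c0) == t then some (i, v) else none := rfl
    by_cases hc : ((if c == lbl then c0 + 1 else c0) == t) = true
    · simp only [pvChanStep]
      rw [if_pos hc, ih _ (i, v), hone, if_pos hc]
      rcases pvLastAt? (pvTable lbl (if c == lbl then c0 + 1 else c0) rest).reverse t with _ | r <;> rfl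
    · simp only [pvChanStep]
      rw [if_neg hc, ih _ d, hone, if_neg hc]
      rcases pvLastAt? (pvTable lbl (if c == lbl then c0 + 1 else c0) rest).reverse t with _ | r <;> rfl

-- B's table-building fold is the product of the two pvTable's (appended to the accumulators)
theorem pvBuild_split (L : List (Int × Int × String)) (ca cb : Int)
    (tA tB : List (Int × Int × Int)) :
    L.foldl pvBuild (ca, cb, tA, tB) =
      (((L.map (fun p => ((p.1, p.2.1), p.2.2))).foldl (fun c p => if p.2 == "A" then c + 1 else c) ca),
       ((L.map (fun p => ((p.1, p.2.1), p.2.2))).foldl (fun c p => if p.2 == "B" then c + 1 else c) cb),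
       tA ++ pvTable "A" ca (L.map (fun p => ((p.1, p.2.1), p.2.2))),
       tB ++ pvTable "B" cb (L.map (fun p => ((p.1, p.2.1), p.2.2)))) := by
  induction L generalizing ca cb tA tB with
  | nil => simp [pvTable]
  | cons p rest ih =>
    obtain ⟨i, v, c⟩ := p
    simp only [List.foldl_cons, List.map_cons, pvBuild, pvTable, ih]
    simp

-- the two iteration shapes: zip(enumerate Lv, Lc) vs enumerate (zip Lv Lc)
theorem pvShape (Lv : List Int) (Lc : List String) (s : Int) :
    (PySem.List.enumerate Lv s).zip Lc =
      (PySem.List.enumerate (Lv.zip Lc) s).map (fun p => ((p.1, p.2.1), p.2.2)) := by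
  induction Lv generalizing Lc s with
  | nil => simp [PySem.List.enumerate_nil]
  | cons v rest ih =>
    cases Lc with
    | nil => simp [PySem.List.enumerate_nil]
    | cons c cs => simp [PySem.List.enumerate_cons, ih]

-- ===== VERDICT (by name: the statement is the Claim_ definition above) =====
theorem calculateIandQ_spec : Claim_equal_calculateIandQ := by
  intro Lv Lc a b _
  unfold Spec_calculateIandQ calculateIandQ calculateIandQ_alt
  rw [pvBuild_split, pvStepA_split, ← pvShape Lv Lc 0]
  have hA := pvChan_eq_table "A" a ((PySem.List.enumerate Lv 0).zip Lc) 0 (-1, -1)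
  have hB := pvChan_eq_table "B" b ((PySem.List.enumerate Lv 0).zip Lc) 0 (-1, -1)
  simp only [List.nil_append]
  rw [pvLastAt_eq, pvLastAt_eq, ← hA, ← hB]
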